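-- pv_equiv track=rewrite | github.com/MrBrantCode/unitest_baseline | mut_generate/mist_train_cf/cf_10284/solution.py | most_common_number
-- ===== SOURCE A (Python) =====
-- def most_common_number(numbers):
--     if len(numbers) == 0:
--         return None
--
--     counts = {}
--     for number in numbers:
--         if number in counts:
--             counts[number] += 1
--         else:
--             counts[number] = 1
--
--     max_count = max(counts.values())
--     most_common_numbers = [number for number, count in counts.items() if count == max_count]
--
--     return min(most_common_numbers)
-- ===== SOURCE B (Python) =====
-- def most_common_number(numbers):
--     if not numbers:
--         return None
--     runs = []
--     for x in sorted(numbers):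
--         if runs and runs[-1][0] == x:
--             runs[-1] = (x, runs[-1][1] + 1)
--         else:
--             runs.append((x, 1))
--     best, best_cnt = None, 0
--     for v, c in runs:
--         if c > best_cnt:
--             best, best_cnt = v, c
--     return best
-- ===== Notes on version B (the rewrite author's own statement) =====
-- stated objective: alternative
-- what changed: Replaces the count-dict plus max/filter/min pipeline with sorting: B groups the sorted copy of the list into runs and keeps the strictly-best run in one scan, so the first (smallest) value among tied counts wins.
import Mathlib
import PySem

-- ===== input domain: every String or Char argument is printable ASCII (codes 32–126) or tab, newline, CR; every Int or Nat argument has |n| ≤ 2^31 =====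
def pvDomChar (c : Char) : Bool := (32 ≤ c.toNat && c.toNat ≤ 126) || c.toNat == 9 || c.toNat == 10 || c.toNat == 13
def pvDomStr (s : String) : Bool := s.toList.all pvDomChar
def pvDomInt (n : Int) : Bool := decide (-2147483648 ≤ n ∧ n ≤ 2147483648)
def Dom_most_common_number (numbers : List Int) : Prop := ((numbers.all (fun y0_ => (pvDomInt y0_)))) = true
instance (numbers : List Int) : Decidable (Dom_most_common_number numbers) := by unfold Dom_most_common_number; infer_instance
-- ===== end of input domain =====

-- B replaces A's count-dict + max/filter/min pipeline with a sort: it groups the sorted list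
-- into runs and keeps the strictly-best run in one scan (alternative decomposition; no speed claim).

-- ===== PORT A =====
def most_common_number (numbers : List Int) : Option Int :=
  if numbers.length == 0 then none
  else
    let counts : PySem.Dict Int Int := numbers.foldl
      (fun counts number =>
        if counts.contains number then counts.insert number (counts.getD number 0 + 1)
        else counts.insert number 1) PySem.Dict.empty
    match PySem.List.max? counts.values (fun v => v) with
    | none => none   -- unreachable: values is nonempty when numbers ≠ [] (Python max would raise)
    | some max_count =>
      let most_common_numbers :=
        (counts.items.filter (fun p => p.2 == max_count)).map (fun p => p.1)
      PySem.List.min? most_common_numbers (fun v => v)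

-- ===== PORT B =====
-- one step of the run-building loop: 'if runs and runs[-1][0] == x: runs[-1] = (x, runs[-1][1]+1) else: runs.append((x, 1))'
def pvStepRun (runs : List (Int × Int)) (x : Int) : List (Int × Int) :=
  match runs.getLast? with
  | some (v, k) => if v == x then runs.dropLast ++ [(x, k + 1)] else runs ++ [(x, 1)]
  | none => [(x, 1)]

def most_common_number_alt (numbers : List Int) : Option Int :=
  if numbers == [] then none
  else
    let runs := (PySem.List.sorted numbers (fun x => x) false).foldl pvStepRun []
    (runs.foldl
      (fun st p => if p.2 > st.2 then ((some p.1 : Option Int), p.2) else st)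
      ((none : Option Int), (0 : Int))).1

-- ===== PRECONDITION & SPEC =====
def Spec_most_common_number (numbers : List Int) (out : Option Int) : Prop := out = most_common_number_alt numbers
instance (numbers : List Int) (out : Option Int) : Decidable (Spec_most_common_number numbers out) := by unfold Spec_most_common_number; infer_instance

-- ===== CLAIM (what is proved, stated in full; the proofs are below) =====
def Claim_equal_most_common_number : Prop := ∀ (numbers : List Int), Dom_most_common_number numbers → Spec_most_common_number numbers (most_common_number numbers)

-- ===== LEMMAS AND PROOFS =====

-- A's hand-built counting dict is Counter(numbers).
theorem pv_fold_eq_counter (numbers : List Int) :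
    numbers.foldl
      (fun counts number =>
        if counts.contains number then counts.insert number (counts.getD number 0 + 1)
        else counts.insert number 1) (PySem.Dict.empty : PySem.Dict Int Int)
    = PySem.Dict.counter numbers := by
  have hstep : (fun (d : PySem.Dict Int Int) (n : Int) =>
      if d.contains n then d.insert n (d.getD n 0 + 1) else d.insert n 1)
      = (fun (d : PySem.Dict Int Int) (n : Int) => d.insert n (d.getD n 0 + 1)) := by
    funext d n
    by_cases h : d.contains n = true
    · simp [h]
    · have h' : d.contains n = false := by simpa using h
      have hg : d.get? n = none := by
        have hc := PySem.Dict.contains_eq_isSome_get? (d := d) (k := n)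
        rw [h'] at hc
        exact Option.not_isSome_iff_eq_none.mp (by rw [← hc]; simp)
      simp [h', PySem.Dict.getD, hg]
  rw [hstep, PySem.Dict.foldl_insert_getD_add_one_eq_counter]

-- B's strict-greater scan over a strictly increasing list returns the first (= smallest)
-- value maximizing c, together with its c-value.
theorem pv_scan_aux (c : Int → Int) (t : List Int) : ∀ (b : Int),
    (∀ y ∈ t, b < y) → t.Pairwise (· < ·) →
    ∃ m, (t.foldl (fun st x => if c x > st.2 then (some x, c x) else st)
            ((some b : Option Int), c b)) = (some m, c m)
      ∧ (m = b ∨ m ∈ t)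
      ∧ (∀ y, (y = b ∨ y ∈ t) → c y ≤ c m)
      ∧ (∀ y, (y = b ∨ y ∈ t) → c y = c m → m ≤ y) := by
  induction t with
  | nil =>
    intro b _ _
    exact ⟨b, rfl, Or.inl rfl, by rintro y (rfl | h); exact le_refl _; simp at h,
      by rintro y (rfl | h) _; exact le_refl _; simp at h⟩
  | cons x t ih =>
    intro b hb hp
    have hxt : ∀ y ∈ t, x < y := fun y hy => (List.pairwise_cons.mp hp).1 y hy
    have hpt : t.Pairwise (· < ·) := (List.pairwise_cons.mp hp).2
    simp only [List.foldl_cons]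
    by_cases hgt : c x > c b
    · rw [if_pos hgt]
      obtain ⟨m, heq, hmem, hmax, htie⟩ := ih x hxt hpt
      refine ⟨m, heq, ?_, ?_, ?_⟩
      · rcases hmem with rfl | h
        · exact Or.inr (List.mem_cons_self)
        · exact Or.inr (List.mem_cons_of_mem _ h)
      · rintro y (rfl | hy)
        · have := hmax x (Or.inl rfl); omega
        · rcases List.mem_cons.mp hy with rfl | hy'
          · exact hmax y (Or.inl rfl)
          · exact hmax y (Or.inr hy')
      · rintro y (rfl | hy) hcy
        · -- y = b: c b < c x ≤ c m, contradiction with c b = c m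
          have := hmax x (Or.inl rfl); omega
        · rcases List.mem_cons.mp hy with rfl | hy'
          · exact htie y (Or.inl rfl) hcy
          · exact htie y (Or.inr hy') hcy
    · rw [if_neg hgt]
      have hbt : ∀ y ∈ t, b < y := fun y hy => hb y (List.mem_cons_of_mem _ hy)
      obtain ⟨m, heq, hmem, hmax, htie⟩ := ih b hbt hpt
      refine ⟨m, heq, ?_, ?_, ?_⟩
      · rcases hmem with rfl | h
        · exact Or.inl rfl
        · exact Or.inr (List.mem_cons_of_mem _ h)
      · rintro y (rfl | hy)
        · exact hmax y (Or.inl rfl)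
        · rcases List.mem_cons.mp hy with rfl | hy'
          · have := hmax b (Or.inl rfl); omega
          · exact hmax y (Or.inr hy')
      · rintro y (rfl | hy) hcy
        · exact htie y (Or.inl rfl) hcy
        · rcases List.mem_cons.mp hy with rfl | hy'
          · -- y = x, c x ≤ c b ≤ c m = c x so c b = c m → m ≤ b < x
            have h1 := hmax b (Or.inl rfl)
            have h2 : c b = c m := by omega
            have h3 := htie b (Or.inl rfl) h2
            have h4 := hb y List.mem_cons_self
            omega
          · exact htie y (Or.inr hy') hcy

theorem pv_foldl_add_sublist : ∀ (xs acc : List Int), (List.foldl PySem.Set.add acc xs).Sublist (acc ++ xs)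
  | [], acc => by simp
  | x :: xs, acc => by
    simp only [List.foldl_cons]
    have h := pv_foldl_add_sublist xs (PySem.Set.add acc x)
    have h2 : (PySem.Set.add acc x ++ xs).Sublist (acc ++ x :: xs) := by
      unfold PySem.Set.add
      split
      · exact (List.append_sublist_append_left acc).mpr (List.sublist_cons_self x xs)
      · simp
    exact h.trans h2

theorem pv_dedup_sublist (xs : List Int) : (PySem.List.dedup xs).Sublist xs := by
  have := pv_foldl_add_sublist xs []
  simpa [PySem.List.dedup_eq_ofList, PySem.Set.ofList_eq_foldl] using this

theorem pv_dedup_append (p : List Int) (x : Int) :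
    PySem.List.dedup (p ++ [x]) = if x ∈ p then PySem.List.dedup p else PySem.List.dedup p ++ [x] := by
  simp only [PySem.List.dedup_eq_ofList, PySem.Set.ofList_eq_foldl, List.foldl_append, List.foldl_cons, List.foldl_nil]
  rw [← PySem.Set.ofList_eq_foldl]
  unfold PySem.Set.add
  by_cases h : x ∈ p
  · rw [if_pos h]
    rw [if_pos]
    simpa [PySem.Set.contains] using (PySem.Set.mem_ofList p x).mpr h
  · rw [if_neg h, if_neg]
    simpa [PySem.Set.contains] using fun hc => h ((PySem.Set.mem_ofList p x).mp hc)

theorem pv_pairwise_le_getLast (l : List Int) (h : l.Pairwise (· ≤ ·)) (hne : l ≠ []) :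
    ∀ y ∈ l, y ≤ l.getLast hne := by
  intro y hy
  rcases List.eq_nil_or_concat l with rfl | ⟨l', a, rfl⟩
  · exact absurd rfl hne
  · have hg : (l'.concat a).getLast hne = a := by simp
    rw [hg]
    rw [List.concat_eq_append] at hy h
    rcases List.mem_append.mp hy with h1 | h2
    · exact (List.pairwise_append.mp h).2.2 y h1 a (List.mem_singleton_self a)
    · simp at h2; omega

theorem pv_runs_spec (s : List Int) (hs : s.Pairwise (· ≤ ·)) :
    s.foldl pvStepRun [] = (PySem.List.dedup s).map (fun v => (v, (s.count v : Int))) := by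
  induction s using List.reverseRecOn with
  | nil => simp [PySem.List.dedup_eq_ofList, PySem.Set.ofList_eq_foldl]
  | append_singleton p x ih =>
    have hp : p.Pairwise (· ≤ ·) := (List.pairwise_append.mp hs).1
    have hle : ∀ y ∈ p, y ≤ x := fun y hy =>
      (List.pairwise_append.mp hs).2.2 y hy x (List.mem_singleton_self x)
    rw [List.foldl_append, List.foldl_cons, List.foldl_nil, ih hp, pv_dedup_append]
    have hLsub := pv_dedup_sublist p
    have hLpair : (PySem.List.dedup p).Pairwise (· ≤ ·) := hp.sublist hLsub
    have hLmem : ∀ y, y ∈ PySem.List.dedup p ↔ y ∈ p := fun y => PySem.List.mem_dedup p y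
    by_cases hx : x ∈ p
    · rw [if_pos hx]
      have hxL : x ∈ PySem.List.dedup p := (hLmem x).mpr hx
      have hLne : PySem.List.dedup p ≠ [] := List.ne_nil_of_mem hxL
      have hglast : (PySem.List.dedup p).getLast hLne = x := by
        have h1 : (PySem.List.dedup p).getLast hLne ≤ x :=
          hle _ ((hLmem _).mp (List.getLast_mem hLne))
        have h2 : x ≤ (PySem.List.dedup p).getLast hLne :=
          pv_pairwise_le_getLast _ hLpair hLne x hxL
        omega
      have hdecomp : PySem.List.dedup p = (PySem.List.dedup p).dropLast ++ [x] := by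
        conv_lhs => rw [← List.dropLast_append_getLast hLne]
        rw [hglast]
      have hnodup : (PySem.List.dedup p).Nodup := PySem.List.nodup_dedup p
      have hxnot : x ∉ (PySem.List.dedup p).dropLast := by
        rw [hdecomp] at hnodup
        intro hmem
        exact ((List.nodup_append.mp hnodup).2.2 x hmem x (by simp)) rfl
      set L' := (PySem.List.dedup p).dropLast with hL'
      have hmapdecomp : (PySem.List.dedup p).map (fun v => (v, (p.count v : Int)))
          = L'.map (fun v => (v, (p.count v : Int))) ++ [(x, (p.count x : Int))] := by
        conv_lhs => rw [hdecomp]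
        simp
      rw [hmapdecomp]
      have hlhs : pvStepRun (L'.map (fun v => (v, (p.count v : Int))) ++ [(x, (p.count x : Int))]) x
          = L'.map (fun v => (v, (p.count v : Int))) ++ [(x, (p.count x : Int) + 1)] := by
        unfold pvStepRun
        simp
      rw [hlhs]
      conv_rhs => rw [hdecomp]
      rw [List.map_append]
      congr 1
      · apply List.map_congr_left
        intro v hv
        have hvx : v ≠ x := fun h => hxnot (h ▸ hv)
        have h0 : List.count v [x] = 0 :=
          List.count_eq_zero.mpr (by simp [hvx])
        rw [List.count_append, h0]
        simp
      · have hc1 : (p ++ [x]).count x = p.count x + 1 := by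
          rw [List.count_append]; simp
        simp only [List.map_cons, List.map_nil, hc1]
        push_cast
        ring_nf
    · rw [if_neg hx]
      have hcx0 : p.count x = 0 := List.count_eq_zero_of_not_mem hx
      have hcx : (p ++ [x]).count x = 1 := by
        rw [List.count_append, hcx0]; simp
      rw [List.map_append]
      have hmapeq : (PySem.List.dedup p).map (fun v => (v, ((p ++ [x]).count v : Int)))
          = (PySem.List.dedup p).map (fun v => (v, (p.count v : Int))) := by
        apply List.map_congr_left
        intro v hv
        have hvx : v ≠ x := fun h => hx (h ▸ (hLmem v).mp hv)
        have h0 : List.count v [x] = 0 :=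
          List.count_eq_zero.mpr (by simp [hvx])
        rw [List.count_append, h0]
        simp
      rw [hmapeq]
      rcases List.eq_nil_or_concat (PySem.List.dedup p) with hLnil | ⟨L', g, hLg⟩
      · rw [hLnil]
        simp [pvStepRun]
        exact hcx0
      · rw [List.concat_eq_append] at hLg
        have hgmem : g ∈ p := (hLmem g).mp (by rw [hLg]; simp)
        have hgx : g ≠ x := fun h => hx (h ▸ hgmem)
        rw [hLg]
        unfold pvStepRun
        simp [hgx]
        exact hcx0

-- A and B agree on every input.
theorem pv_ab_eq (numbers : List Int) :
    most_common_number numbers = most_common_number_alt numbers := by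
  by_cases hnil : numbers = []
  · subst hnil; rfl
  · set c : Int → Int := fun x => (numbers.count x : Int) with hc
    set d : List Int := PySem.Set.ofList numbers with hd
    have hmemd : ∀ y, y ∈ d ↔ y ∈ numbers := fun y => PySem.Set.mem_ofList numbers y
    have hdne : d ≠ [] := by
      cases numbers with
      | nil => exact absurd rfl hnil
      | cons n ns =>
        intro h
        have : n ∈ d := (hmemd n).mpr List.mem_cons_self
        rw [h] at this; simp at this
    -- ===== A side =====
    have hlen : (numbers.length == 0) = false := by
      simp [List.length_eq_zero_iff, hnil]
    have hitems : (PySem.Dict.counter numbers : PySem.Dict Int Int).items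
        = d.map (fun k => (k, c k)) := by
      rw [PySem.Dict.items_counter]
    have hvalues : (PySem.Dict.counter numbers : PySem.Dict Int Int).values = d.map c := by
      simp only [PySem.Dict.values, hitems, List.map_map]
      rfl
    obtain ⟨M, hM⟩ : ∃ M, PySem.List.max? ((PySem.Dict.counter numbers : PySem.Dict Int Int).values) (fun v => v) = some M := by
      rcases h : PySem.List.max? ((PySem.Dict.counter numbers : PySem.Dict Int Int).values) (fun v => v) with _ | M
      · rw [PySem.List.max?_eq_none_iff] at h
        rw [hvalues] at h
        exact absurd (List.map_eq_nil_iff.mp h) hdne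
      · exact ⟨M, rfl⟩
    have hMmem : M ∈ d.map c := by rw [← hvalues]; exact PySem.List.max?_mem hM
    have hMmax : ∀ y ∈ d, c y ≤ M := by
      intro y hy
      have := PySem.List.max?_isMax hM (c y) (by rw [hvalues]; exact List.mem_map_of_mem hy)
      simpa using this
    have hfilt : ((PySem.Dict.counter numbers : PySem.Dict Int Int).items.filter
          (fun p => p.2 == M)).map (fun p => p.1)
        = d.filter (fun k => c k == M) := by
      rw [hitems, List.filter_map, List.map_map]
      simp [Function.comp_def]
    have hfne : d.filter (fun k => c k == M) ≠ [] := by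
      obtain ⟨k, hk, hck⟩ := List.mem_map.mp hMmem
      intro h
      have : k ∈ d.filter (fun k => c k == M) := by
        rw [List.mem_filter]; exact ⟨hk, by simp [hck]⟩
      rw [h] at this; simp at this
    obtain ⟨a, ha⟩ : ∃ a, PySem.List.min? (d.filter (fun k => c k == M)) (fun v => v) = some a := by
      rcases h : PySem.List.min? (d.filter (fun k => c k == M)) (fun v => v) with _ | a
      · rw [PySem.List.min?_eq_none_iff] at h; exact absurd h hfne
      · exact ⟨a, rfl⟩
    have hamem := PySem.List.min?_mem ha
    have had : a ∈ d := (List.mem_filter.mp hamem).1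
    have hca : c a = M := by have := (List.mem_filter.mp hamem).2; simpa using this
    have hamin : ∀ y ∈ d, c y = M → a ≤ y := by
      intro y hy hcy
      have : y ∈ d.filter (fun k => c k == M) := by
        rw [List.mem_filter]; exact ⟨hy, by simp [hcy]⟩
      have := PySem.List.min?_isMin ha y this
      simpa using this
    have hA : most_common_number numbers = some a := by
      unfold most_common_number
      rw [hlen]
      simp only [Bool.false_eq_true, if_false]
      rw [pv_fold_eq_counter, hM]
      simp only []
      rw [hfilt, ha]
    -- ===== B side =====
    have hBne : (numbers == []) = false := by simp [hnil]
    set s : List Int := PySem.List.sorted numbers (fun x => x) false with hsrt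
    have hsperm : s.Perm numbers := PySem.List.sorted_perm numbers (fun x => x) false
    have hspair : s.Pairwise (· ≤ ·) := by
      have := PySem.List.sorted_pairwise numbers (fun x => x)
      simpa using this
    have hcount : ∀ v : Int, s.count v = numbers.count v := fun v => hsperm.count_eq v
    have hmems : ∀ y, y ∈ s ↔ y ∈ numbers := fun y => hsperm.mem_iff
    have hruns : s.foldl pvStepRun [] = (PySem.List.dedup s).map (fun v => (v, c v)) := by
      rw [pv_runs_spec s hspair]
      apply List.map_congr_left
      intro v _
      rw [hcount v]
    set L : List Int := PySem.List.dedup s with hLdef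
    have hLmem : ∀ y, y ∈ L ↔ y ∈ numbers := fun y => (PySem.List.mem_dedup s y).trans (hmems y)
    have hLlt : L.Pairwise (· < ·) := by
      have h1 : L.Pairwise (· ≤ ·) := hspair.sublist (pv_dedup_sublist s)
      have h2 : L.Pairwise (· ≠ ·) := PySem.List.nodup_dedup s
      exact (h1.and h2).imp (fun h => lt_of_le_of_ne h.1 h.2)
    have hLne : L ≠ [] := by
      cases numbers with
      | nil => exact absurd rfl hnil
      | cons n ns =>
        intro h
        have : n ∈ L := (hLmem n).mpr List.mem_cons_self
        rw [h] at this; simp at this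
    obtain ⟨x, t, hxt⟩ : ∃ x t, L = x :: t := by
      cases h : L with
      | nil => exact absurd h hLne
      | cons x t => exact ⟨x, t, rfl⟩
    have hLxtmem : ∀ y, (y = x ∨ y ∈ t) ↔ y ∈ numbers := by
      intro y
      rw [← hLmem y, hxt, List.mem_cons]
    have hxnum : x ∈ numbers := (hLxtmem x).mp (Or.inl rfl)
    have hcx : c x > 0 := by
      simp only [hc]
      exact_mod_cast List.count_pos_iff.mpr hxnum
    have hpx := List.pairwise_cons.mp (hxt ▸ hLlt)
    obtain ⟨m, heq, hmem, hmax, htie⟩ := pv_scan_aux c t x hpx.1 hpx.2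
    have hB : most_common_number_alt numbers = some m := by
      unfold most_common_number_alt
      rw [hBne]
      simp only [Bool.false_eq_true, if_false]
      rw [← hsrt, hruns, hxt]
      rw [List.map_cons, List.foldl_cons, List.foldl_map]
      have h1 : (if c x > (((none : Option Int), (0 : Int)) : Option Int × Int).2
            then ((some x : Option Int), c x) else ((none : Option Int), (0 : Int)))
          = ((some x : Option Int), c x) := by
        simp only []
        rw [if_pos hcx]
      rw [h1, heq]
    -- ===== glue =====
    have hmnum : m ∈ numbers := (hLxtmem m).mp hmem
    have hcm : c m = M := by
      have h1 : c m ≤ M := hMmax m ((hmemd m).mpr hmnum)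
      have h2 : M ≤ c m := by
        obtain ⟨k, hk, hck⟩ := List.mem_map.mp hMmem
        have := hmax k ((hLxtmem k).mpr ((hmemd k).mp hk))
        omega
      omega
    have h1 : a ≤ m := hamin m ((hmemd m).mpr hmnum) hcm
    have h2 : m ≤ a := htie a ((hLxtmem a).mpr ((hmemd a).mp had)) (by omega)
    rw [hA, hB]
    exact congrArg some (le_antisymm h1 h2)

-- ===== VERDICT (by name: the statement is the Claim_ definition above) =====
theorem most_common_number_spec : Claim_equal_most_common_number := by
  intro numbers _
  unfold Spec_most_common_number
  exact pv_ab_eq numbers
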